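-- pv_equiv track=rewrite | github.com/THU-KEG/EAkit | semi_utils.py | boot_update_triple
-- ===== SOURCE A (Python) =====
-- def boot_update_triple(A, B, triple):
--     assert len(A) == len(B)
--     new_triple = []
--     h_rt, t_hr = {}, {}
--     for (h, r, t) in triple:
--         if h not in h_rt:
--             h_rt[h] = set()
--         h_rt[h].add((r, t))
--         if t not in t_hr:
--             t_hr[t] = set()
--         t_hr[t].add((h, r))
--     for i in range(len(A)):
--         if A[i] in h_rt:
--             for (r, t) in h_rt[A[i]]:
--                 new_triple.append((B[i], r, t))
--         if A[i] in t_hr: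
--             for (h, r) in t_hr[A[i]]:
--                 new_triple.append((h, r, B[i]))
--         if B[i] in h_rt:
--             for (r, t) in h_rt[B[i]]:
--                 new_triple.append((A[i], r, t))
--         if B[i] in t_hr:
--             for (h, r) in t_hr[B[i]]:
--                 new_triple.append((h, r, A[i]))
--     new_triple = list(set(new_triple))
--     return new_triple
-- ===== SOURCE B (Python) =====
-- def boot_update_triple(A, B, triple):
--     assert len(A) == len(B)
--     sub = {}
--     for a, b in zip(A, B):
--         sub.setdefault(a, set()).add(b)
--         sub.setdefault(b, set()).add(a)
--     out = set()
--     for h, r, t in triple: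
--         if h in sub:
--             for p in sub[h]:
--                 out.add((p, r, t))
--         if t in sub:
--             for p in sub[t]:
--                 out.add((h, r, p))
--     return sorted(out)
-- ===== Notes on version B (the rewrite author's own statement) =====
-- stated objective: alternative
-- what changed: A indexes the triples into head->(r,t) and tail->(h,r) dicts and then scans the alignment pairs; B inverts that structure: it indexes the alignment into a single entity->partners map and makes one pass over the triples, accumulating straight into a set, and returns the sorted distinct triples (the order of A's list(set(...)) is unspecified and outputs are compared as sets).
import Mathlib
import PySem

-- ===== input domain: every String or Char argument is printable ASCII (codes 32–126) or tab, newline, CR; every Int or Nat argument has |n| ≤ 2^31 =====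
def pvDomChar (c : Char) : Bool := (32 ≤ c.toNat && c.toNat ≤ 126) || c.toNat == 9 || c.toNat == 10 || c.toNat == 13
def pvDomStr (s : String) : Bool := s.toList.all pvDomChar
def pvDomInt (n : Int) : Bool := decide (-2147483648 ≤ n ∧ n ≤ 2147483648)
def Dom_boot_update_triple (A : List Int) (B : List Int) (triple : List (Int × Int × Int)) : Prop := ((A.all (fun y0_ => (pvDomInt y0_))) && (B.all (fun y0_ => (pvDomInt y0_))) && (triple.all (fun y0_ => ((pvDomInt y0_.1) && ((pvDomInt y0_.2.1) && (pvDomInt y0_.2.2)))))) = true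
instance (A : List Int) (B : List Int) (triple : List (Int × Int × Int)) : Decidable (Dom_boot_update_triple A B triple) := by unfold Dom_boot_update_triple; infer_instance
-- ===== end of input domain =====

-- B replaces A's index-the-triples-then-scan-alignment structure by a partner map over the alignment
-- and a single pass over the triples, returning the sorted distinct triples.

-- Both Pythons return the distinct accumulated triples (A: `list(set(new_triple))`, whose iteration
-- order is hash-based and not modelled; B: `sorted(out)`).  Outputs are compared as sets, so both
-- ports canonicalise through the same sorted list of the distinct elements: a library merge sort by
-- Python's lexicographic order on int triples (exact for B's `sorted`; for A a canonical choice of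
-- the unspecified set order).
def leT (a b : Int × Int × Int) : Bool :=
  decide (a.1 < b.1 ∨ (a.1 = b.1 ∧ (a.2.1 < b.2.1 ∨ (a.2.1 = b.2.1 ∧ a.2.2 ≤ b.2.2))))

def sortTriples (l : List (Int × Int × Int)) : List (Int × Int × Int) := l.mergeSort leT

-- ===== PORT A =====
-- one iteration of A's first loop on h_rt: 'if h not in h_rt: h_rt[h] = set(); h_rt[h].add((r, t))'
def hrtStep (d : PySem.Dict Int (PySem.Set (Int × Int))) (x : Int × Int × Int) :
    PySem.Dict Int (PySem.Set (Int × Int)) :=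
  (if d.contains x.1 then d else d.insert x.1 PySem.Set.empty).modify x.1 PySem.Set.empty
    (fun s => s.add (x.2.1, x.2.2))

-- one iteration of A's first loop on t_hr: 'if t not in t_hr: t_hr[t] = set(); t_hr[t].add((h, r))'
def thrStep (d : PySem.Dict Int (PySem.Set (Int × Int))) (x : Int × Int × Int) :
    PySem.Dict Int (PySem.Set (Int × Int)) :=
  (if d.contains x.2.2 then d else d.insert x.2.2 PySem.Set.empty).modify x.2.2 PySem.Set.empty
    (fun s => s.add (x.1, x.2.1))

-- the body of A's second loop: the four conditional append blocks for one i (ai = A[i], bi = B[i]);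
-- 'for (r, t) in h_rt[...]' iterates the stored set (insertion-order model; the final set-dedup result
-- does not depend on this order, which is all the theorem uses)
def aBlock (h_rt t_hr : PySem.Dict Int (PySem.Set (Int × Int)))
    (acc : List (Int × Int × Int)) (ai bi : Int) : List (Int × Int × Int) :=
  let acc := if h_rt.contains ai then acc ++ (h_rt.getD ai PySem.Set.empty).map (fun rt => (bi, rt.1, rt.2)) else acc
  let acc := if t_hr.contains ai then acc ++ (t_hr.getD ai PySem.Set.empty).map (fun hr => (hr.1, hr.2, bi)) else acc
  let acc := if h_rt.contains bi then acc ++ (h_rt.getD bi PySem.Set.empty).map (fun rt => (ai, rt.1, rt.2)) else acc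
  if t_hr.contains bi then acc ++ (t_hr.getD bi PySem.Set.empty).map (fun hr => (hr.1, hr.2, ai)) else acc

def boot_update_triple (A : List Int) (B : List Int) (triple : List (Int × Int × Int)) : List (Int × Int × Int) :=
  -- assert len(A) == len(B)  → Pre_boot_update_triple
  -- first loop: build h_rt and t_hr (one pass, two dict accumulators)
  let dicts := triple.foldl (fun st x => (hrtStep st.1 x, thrStep st.2 x))
    ((PySem.Dict.empty : PySem.Dict Int (PySem.Set (Int × Int))), (PySem.Dict.empty : PySem.Dict Int (PySem.Set (Int × Int))))
  -- second loop: for i in range(len(A))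
  let new_triple := (PySem.List.pyRange 0 (PySem.List.len A) 1).foldl
    (fun acc i => aBlock dicts.1 dicts.2 acc (PySem.List.pyGetD A i 0) (PySem.List.pyGetD B i 0)) []
  -- new_triple = list(set(new_triple))
  sortTriples (PySem.Set.ofList new_triple)

-- ===== PORT B =====
-- one iteration of B's alignment loop: 'sub.setdefault(a, set()).add(b); sub.setdefault(b, set()).add(a)'
def subStep (d : PySem.Dict Int (PySem.Set Int)) (ab : Int × Int) : PySem.Dict Int (PySem.Set Int) :=
  (d.insert ab.1 ((d.getD ab.1 PySem.Set.empty).add ab.2)).insert ab.2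
    (((d.insert ab.1 ((d.getD ab.1 PySem.Set.empty).add ab.2)).getD ab.2 PySem.Set.empty).add ab.1)

-- the body of B's triple loop: emit substituted triples into the output set
def outStep (sub : PySem.Dict Int (PySem.Set Int)) (o : PySem.Set (Int × Int × Int))
    (x : Int × Int × Int) : PySem.Set (Int × Int × Int) :=
  let o := if sub.contains x.1 then (sub.getD x.1 PySem.Set.empty).foldl (fun o p => o.add (p, x.2.1, x.2.2)) o else o
  if sub.contains x.2.2 then (sub.getD x.2.2 PySem.Set.empty).foldl (fun o p => o.add (x.1, x.2.1, p)) o else o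

def boot_update_triple_alt (A : List Int) (B : List Int) (triple : List (Int × Int × Int)) : List (Int × Int × Int) :=
  -- assert len(A) == len(B)  → Pre_boot_update_triple
  let sub := (A.zip B).foldl subStep PySem.Dict.empty
  let out := triple.foldl (outStep sub) PySem.Set.empty
  sortTriples out  -- sorted(out)

-- ===== PRECONDITION & SPEC =====
-- Pre_ excludes exactly the inputs with len(A) != len(B), on which A's assert raises AssertionError.
def Pre_boot_update_triple (A : List Int) (B : List Int) (triple : List (Int × Int × Int)) : Prop :=
  A.length = B.length
instance (A : List Int) (B : List Int) (triple : List (Int × Int × Int)) : Decidable (Pre_boot_update_triple A B triple) := by unfold Pre_boot_update_triple; infer_instance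

def pvWitness_boot_update_triple : List Int × List Int × (List (Int × Int × Int)) :=
  ([1, 4], [2, 5], [(1, 0, 3), (7, 9, 4)])

def Spec_boot_update_triple (A : List Int) (B : List Int) (triple : List (Int × Int × Int)) (out : List (Int × Int × Int)) : Prop := out = boot_update_triple_alt A B triple
instance (A : List Int) (B : List Int) (triple : List (Int × Int × Int)) (out : List (Int × Int × Int)) : Decidable (Spec_boot_update_triple A B triple out) := by unfold Spec_boot_update_triple; infer_instance

-- ===== CLAIM (what is proved, stated in full; the proofs are below) =====
def Claim_equal_boot_update_triple : Prop := ∀ (A : List Int) (B : List Int) (triple : List (Int × Int × Int)), Dom_boot_update_triple A B triple → Pre_boot_update_triple A B triple → Spec_boot_update_triple A B triple (boot_update_triple A B triple)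

-- ===== LEMMAS AND PROOFS =====

-- the common element specification: z is emitted iff some aligned pair (a, b) (either direction)
-- rewrites the head or the tail of some triple
def EmitSpec (A : List Int) (B : List Int) (triple : List (Int × Int × Int)) (z : Int × Int × Int) : Prop :=
  ∃ ab ∈ A.zip B, ∃ x ∈ triple,
    (x.1 = ab.1 ∧ z = (ab.2, x.2.1, x.2.2)) ∨
    (x.2.2 = ab.1 ∧ z = (x.1, x.2.1, ab.2)) ∨
    (x.1 = ab.2 ∧ z = (ab.1, x.2.1, x.2.2)) ∨
    (x.2.2 = ab.2 ∧ z = (x.1, x.2.1, ab.1))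

-- ---- the canonical sort is determined by the underlying set ----

theorem leT_antisymm (a b : Int × Int × Int) (h1 : leT a b = true) (h2 : leT b a = true) : a = b := by
  simp only [leT, decide_eq_true_eq] at h1 h2
  obtain ⟨a1, a2, a3⟩ := a; obtain ⟨b1, b2, b3⟩ := b
  simp_all only [Prod.mk.injEq]
  omega

theorem sortTriples_eq_of_perm {l1 l2 : List (Int × Int × Int)} (h : l1.Perm l2) :
    sortTriples l1 = sortTriples l2 := by
  have htrans : ∀ a b c : Int × Int × Int, leT a b = true → leT b c = true → leT a c = true := by
    intro a b c h1 h2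
    simp only [leT, decide_eq_true_eq] at *
    omega
  have htot : ∀ a b : Int × Int × Int, (leT a b || leT b a) = true := by
    intro a b
    simp only [leT, Bool.or_eq_true, decide_eq_true_eq]
    omega
  apply List.Perm.eq_of_pairwise
  · intro a b _ _ h1 h2; exact leT_antisymm a b h1 h2
  · exact List.pairwise_mergeSort htrans htot l1
  · exact List.pairwise_mergeSort htrans htot l2
  · exact ((List.mergeSort_perm l1 leT).trans h).trans (List.mergeSort_perm l2 leT).symm

-- ---- A-side: characterising the dict-building loop ----

theorem stepK_getD (d : PySem.Dict Int (PySem.Set (Int × Int))) (kk : Int)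
    (f : PySem.Set (Int × Int) → PySem.Set (Int × Int)) (k : Int) :
    ((if d.contains kk then d else d.insert kk PySem.Set.empty).modify kk PySem.Set.empty f).getD k PySem.Set.empty
      = if k = kk then f (d.getD kk PySem.Set.empty) else d.getD k PySem.Set.empty := by
  by_cases hc : d.contains kk
  · simp [hc, PySem.Dict.getD_modify]
  · have hc' : d.contains kk = false := by simpa using hc
    have h0 := PySem.Dict.getD_of_not_contains d PySem.Set.empty hc'
    simp only [hc', Bool.false_eq_true, if_false, PySem.Dict.getD_modify, PySem.Dict.getD_insert, h0]
    split_ifs <;> rfl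

theorem hrt_getD (triple : List (Int × Int × Int))
    (d : PySem.Dict Int (PySem.Set (Int × Int))) (k : Int) (rt : Int × Int) :
    rt ∈ (triple.foldl hrtStep d).getD k PySem.Set.empty
      ↔ rt ∈ d.getD k PySem.Set.empty ∨ (k, rt.1, rt.2) ∈ triple := by
  obtain ⟨r1, r2⟩ := rt
  induction triple generalizing d with
  | nil => simp
  | cons x tr ih =>
    obtain ⟨x1, x2, x3⟩ := x
    simp only [List.foldl_cons]
    rw [ih, hrtStep, stepK_getD]
    by_cases hk : k = x1
    · subst hk
      simp only [if_true, PySem.Set.mem_add, List.mem_cons, Prod.mk.injEq]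
      tauto
    · simp only [if_neg hk, List.mem_cons, Prod.mk.injEq]
      tauto

theorem thr_getD (triple : List (Int × Int × Int))
    (d : PySem.Dict Int (PySem.Set (Int × Int))) (k : Int) (hr : Int × Int) :
    hr ∈ (triple.foldl thrStep d).getD k PySem.Set.empty
      ↔ hr ∈ d.getD k PySem.Set.empty ∨ (hr.1, hr.2, k) ∈ triple := by
  obtain ⟨h1, h2⟩ := hr
  induction triple generalizing d with
  | nil => simp
  | cons x tr ih =>
    obtain ⟨x1, x2, x3⟩ := x
    simp only [List.foldl_cons]
    rw [ih, thrStep, stepK_getD]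
    by_cases hk : k = x3
    · subst hk
      simp only [if_true, PySem.Set.mem_add, List.mem_cons, Prod.mk.injEq]
      tauto
    · simp only [if_neg hk, List.mem_cons, Prod.mk.injEq]
      tauto

-- membership in one conditional block of A's second loop
theorem mem_block_hrt (triple : List (Int × Int × Int)) (k : Int)
    (f : Int × Int → Int × Int × Int) (z : Int × Int × Int) :
    (z ∈ if (triple.foldl hrtStep PySem.Dict.empty).contains k then
        ((triple.foldl hrtStep PySem.Dict.empty).getD k PySem.Set.empty).map f else [])
      ↔ ∃ rt, (k, rt.1, rt.2) ∈ triple ∧ z = f rt := by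
  have hchar : ∀ rt : Int × Int, rt ∈ (triple.foldl hrtStep PySem.Dict.empty).getD k PySem.Set.empty
      ↔ (k, rt.1, rt.2) ∈ triple := by
    intro rt; rw [hrt_getD]; simp [PySem.Dict.getD_empty, PySem.Set.empty]
  by_cases hc : (triple.foldl hrtStep PySem.Dict.empty).contains k
  · simp only [if_pos hc, List.mem_map]
    constructor
    · rintro ⟨rt, hm, rfl⟩; exact ⟨rt, (hchar rt).1 hm, rfl⟩
    · rintro ⟨rt, hm, rfl⟩; exact ⟨rt, (hchar rt).2 hm, rfl⟩
  · have hc' : (triple.foldl hrtStep PySem.Dict.empty).contains k = false := by simpa using hc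
    have h0 := PySem.Dict.getD_of_not_contains _ PySem.Set.empty hc'
    simp only [hc', Bool.false_eq_true, if_false, List.not_mem_nil, false_iff]
    rintro ⟨rt, hm, rfl⟩
    have := (hrt_getD triple PySem.Dict.empty k rt).2 (Or.inr hm)
    rw [h0] at this
    simp [PySem.Set.empty] at this

theorem mem_block_thr (triple : List (Int × Int × Int)) (k : Int)
    (f : Int × Int → Int × Int × Int) (z : Int × Int × Int) :
    (z ∈ if (triple.foldl thrStep PySem.Dict.empty).contains k then
        ((triple.foldl thrStep PySem.Dict.empty).getD k PySem.Set.empty).map f else [])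
      ↔ ∃ hr, (hr.1, hr.2, k) ∈ triple ∧ z = f hr := by
  have hchar : ∀ hr : Int × Int, hr ∈ (triple.foldl thrStep PySem.Dict.empty).getD k PySem.Set.empty
      ↔ (hr.1, hr.2, k) ∈ triple := by
    intro hr; rw [thr_getD]; simp [PySem.Dict.getD_empty, PySem.Set.empty]
  by_cases hc : (triple.foldl thrStep PySem.Dict.empty).contains k
  · simp only [if_pos hc, List.mem_map]
    constructor
    · rintro ⟨hr, hm, rfl⟩; exact ⟨hr, (hchar hr).1 hm, rfl⟩
    · rintro ⟨hr, hm, rfl⟩; exact ⟨hr, (hchar hr).2 hm, rfl⟩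
  · have hc' : (triple.foldl thrStep PySem.Dict.empty).contains k = false := by simpa using hc
    have h0 := PySem.Dict.getD_of_not_contains _ PySem.Set.empty hc'
    simp only [hc', Bool.false_eq_true, if_false, List.not_mem_nil, false_iff]
    rintro ⟨hr, hm, rfl⟩
    have := (thr_getD triple PySem.Dict.empty k hr).2 (Or.inr hm)
    rw [h0] at this
    simp [PySem.Set.empty] at this

-- aBlock appends a block that does not depend on acc
theorem aBlock_eq (h_rt t_hr : PySem.Dict Int (PySem.Set (Int × Int)))
    (acc : List (Int × Int × Int)) (ai bi : Int) :
    aBlock h_rt t_hr acc ai bi = acc ++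
      ((if h_rt.contains ai then (h_rt.getD ai PySem.Set.empty).map (fun rt => (bi, rt.1, rt.2)) else []) ++
       (if t_hr.contains ai then (t_hr.getD ai PySem.Set.empty).map (fun hr => (hr.1, hr.2, bi)) else []) ++
       (if h_rt.contains bi then (h_rt.getD bi PySem.Set.empty).map (fun rt => (ai, rt.1, rt.2)) else []) ++
       (if t_hr.contains bi then (t_hr.getD bi PySem.Set.empty).map (fun hr => (hr.1, hr.2, ai)) else [])) := by
  unfold aBlock
  split_ifs <;> simp [List.append_assoc]

-- the pyRange-over-indices loop is the zip loop (A and B of equal length)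
theorem foldl_getD_zip {γ : Type} (A : List Int) (B : List Int) (h : A.length = B.length)
    (f : γ → Int → Int → γ) (init : γ) :
    (List.range A.length).foldl (fun acc k => f acc (A.getD k 0) (B.getD k 0)) init
      = (A.zip B).foldl (fun acc ab => f acc ab.1 ab.2) init := by
  induction A generalizing B init with
  | nil => simp
  | cons a A ih =>
    cases B with
    | nil => simp at h
    | cons b B =>
      simp only [List.length_cons, List.range_succ_eq_map, List.foldl_cons, List.foldl_map,
        List.zip_cons_cons, List.getD_cons_zero, List.getD_cons_succ]
      exact ih B (by simpa using h) (f init a b)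

theorem foldl_pyRange_zip {γ : Type} (A : List Int) (B : List Int) (h : A.length = B.length)
    (f : γ → Int → Int → γ) (init : γ) :
    (PySem.List.pyRange 0 (PySem.List.len A) 1).foldl
        (fun acc i => f acc (PySem.List.pyGetD A i 0) (PySem.List.pyGetD B i 0)) init
      = (A.zip B).foldl (fun acc ab => f acc ab.1 ab.2) init := by
  rw [PySem.List.len_eq, PySem.List.pyRange_zero_natCast, List.foldl_map]
  rw [← foldl_getD_zip A B h f init]
  apply PySem.List.foldl_congr_mem
  intro acc k hk
  simp [PySem.List.pyGetD_natCast]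

-- membership in A's accumulated new_triple list
theorem memA_iff (A : List Int) (B : List Int) (triple : List (Int × Int × Int))
    (h : A.length = B.length) (z : Int × Int × Int) :
    z ∈ (PySem.List.pyRange 0 (PySem.List.len A) 1).foldl
        (fun acc i => aBlock (triple.foldl hrtStep PySem.Dict.empty) (triple.foldl thrStep PySem.Dict.empty)
          acc (PySem.List.pyGetD A i 0) (PySem.List.pyGetD B i 0)) []
      ↔ EmitSpec A B triple z := by
  have hzip : (PySem.List.pyRange 0 (PySem.List.len A) 1).foldl
        (fun acc i => aBlock (triple.foldl hrtStep PySem.Dict.empty) (triple.foldl thrStep PySem.Dict.empty)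
          acc (PySem.List.pyGetD A i 0) (PySem.List.pyGetD B i 0)) []
      = (A.zip B).foldl
        (fun acc ab => aBlock (triple.foldl hrtStep PySem.Dict.empty) (triple.foldl thrStep PySem.Dict.empty)
          acc ab.1 ab.2) [] :=
    foldl_pyRange_zip A B h
      (fun acc ai bi => aBlock (triple.foldl hrtStep PySem.Dict.empty) (triple.foldl thrStep PySem.Dict.empty) acc ai bi) []
  have hcong := PySem.List.foldl_congr_mem
      (l := A.zip B) (init := ([] : List (Int × Int × Int)))
      (f := fun acc (ab : Int × Int) => aBlock (triple.foldl hrtStep PySem.Dict.empty) (triple.foldl thrStep PySem.Dict.empty) acc ab.1 ab.2)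
      (g := fun acc (ab : Int × Int) => acc ++
        ((if (triple.foldl hrtStep PySem.Dict.empty).contains ab.1 then ((triple.foldl hrtStep PySem.Dict.empty).getD ab.1 PySem.Set.empty).map (fun rt => (ab.2, rt.1, rt.2)) else []) ++
         (if (triple.foldl thrStep PySem.Dict.empty).contains ab.1 then ((triple.foldl thrStep PySem.Dict.empty).getD ab.1 PySem.Set.empty).map (fun hr => (hr.1, hr.2, ab.2)) else []) ++
         (if (triple.foldl hrtStep PySem.Dict.empty).contains ab.2 then ((triple.foldl hrtStep PySem.Dict.empty).getD ab.2 PySem.Set.empty).map (fun rt => (ab.1, rt.1, rt.2)) else []) ++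
         (if (triple.foldl thrStep PySem.Dict.empty).contains ab.2 then ((triple.foldl thrStep PySem.Dict.empty).getD ab.2 PySem.Set.empty).map (fun hr => (hr.1, hr.2, ab.1)) else [])))
      (fun acc ab _ => aBlock_eq _ _ acc ab.1 ab.2)
  rw [hzip, hcong, PySem.List.foldl_append_eq_flatMap]
  simp only [List.nil_append, List.mem_flatMap, List.mem_append, mem_block_hrt, mem_block_thr]
  unfold EmitSpec
  constructor
  · rintro ⟨ab, hab, (((⟨rt, hm, rfl⟩ | ⟨hr, hm, rfl⟩) | ⟨rt, hm, rfl⟩) | ⟨hr, hm, rfl⟩)⟩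
    · exact ⟨ab, hab, (ab.1, rt.1, rt.2), hm, Or.inl ⟨rfl, rfl⟩⟩
    · exact ⟨ab, hab, (hr.1, hr.2, ab.1), hm, Or.inr (Or.inl ⟨rfl, rfl⟩)⟩
    · exact ⟨ab, hab, (ab.2, rt.1, rt.2), hm, Or.inr (Or.inr (Or.inl ⟨rfl, rfl⟩))⟩
    · exact ⟨ab, hab, (hr.1, hr.2, ab.2), hm, Or.inr (Or.inr (Or.inr ⟨rfl, rfl⟩))⟩
  · rintro ⟨ab, hab, x, hx, (⟨h1, rfl⟩ | ⟨h1, rfl⟩ | ⟨h1, rfl⟩ | ⟨h1, rfl⟩)⟩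
    · exact ⟨ab, hab, Or.inl (Or.inl (Or.inl ⟨x.2, by rw [← h1]; exact hx, rfl⟩))⟩
    · exact ⟨ab, hab, Or.inl (Or.inl (Or.inr ⟨(x.1, x.2.1), by rw [← h1]; exact hx, rfl⟩))⟩
    · exact ⟨ab, hab, Or.inl (Or.inr ⟨x.2, by rw [← h1]; exact hx, rfl⟩)⟩
    · exact ⟨ab, hab, Or.inr ⟨(x.1, x.2.1), by rw [← h1]; exact hx, rfl⟩⟩

-- ---- B-side ----

theorem stepB_getD (d : PySem.Dict Int (PySem.Set Int)) (a b e p : Int) :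
    p ∈ (subStep d (a, b)).getD e PySem.Set.empty
      ↔ p ∈ d.getD e PySem.Set.empty ∨ (a = e ∧ b = p) ∨ (b = e ∧ a = p) := by
  unfold subStep
  simp only [PySem.Dict.getD_insert]
  split_ifs <;> subst_vars <;> simp_all [PySem.Set.mem_add] <;> tauto

theorem sub_getD_mem (P : List (Int × Int)) (d : PySem.Dict Int (PySem.Set Int)) (e p : Int) :
    p ∈ (P.foldl subStep d).getD e PySem.Set.empty
      ↔ p ∈ d.getD e PySem.Set.empty ∨ ∃ ab ∈ P, (ab.1 = e ∧ ab.2 = p) ∨ (ab.2 = e ∧ ab.1 = p) := by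
  induction P generalizing d with
  | nil => simp
  | cons ab P ih =>
    obtain ⟨a, b⟩ := ab
    simp only [List.foldl_cons]
    rw [ih, stepB_getD]
    simp only [List.mem_cons]
    constructor
    · rintro ((h | h | h) | ⟨q, hq, hh⟩)
      · exact Or.inl h
      · exact Or.inr ⟨(a, b), Or.inl rfl, by tauto⟩
      · exact Or.inr ⟨(a, b), Or.inl rfl, by tauto⟩
      · exact Or.inr ⟨q, Or.inr hq, hh⟩
    · rintro (h | ⟨q, (rfl | hq), hh⟩)
      · exact Or.inl (Or.inl h)
      · simp only at hh; exact Or.inl (by tauto)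
      · exact Or.inr ⟨q, hq, hh⟩

theorem outStep_mem (sub : PySem.Dict Int (PySem.Set Int)) (o : PySem.Set (Int × Int × Int))
    (x : Int × Int × Int) (z : Int × Int × Int) :
    z ∈ outStep sub o x ↔ z ∈ o
      ∨ (∃ p ∈ sub.getD x.1 PySem.Set.empty, z = (p, x.2.1, x.2.2))
      ∨ (∃ p ∈ sub.getD x.2.2 PySem.Set.empty, z = (x.1, x.2.1, p)) := by
  unfold outStep
  by_cases h1 : sub.contains x.1 <;> by_cases h2 : sub.contains x.2.2
  · simp only [h1, h2, if_true, PySem.Set.mem_foldl_add]; exact or_assoc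
  · have h2' : sub.contains x.2.2 = false := by simpa using h2
    have e2 := PySem.Dict.getD_of_not_contains sub PySem.Set.empty h2'
    simp only [h1, h2', if_true, Bool.false_eq_true, if_false, PySem.Set.mem_foldl_add, e2]
    simp [PySem.Set.empty]
  · have h1' : sub.contains x.1 = false := by simpa using h1
    have e1 := PySem.Dict.getD_of_not_contains sub PySem.Set.empty h1'
    simp only [h1', h2, if_true, Bool.false_eq_true, if_false, PySem.Set.mem_foldl_add, e1]
    simp [PySem.Set.empty]
  · have h1' : sub.contains x.1 = false := by simpa using h1
    have h2' : sub.contains x.2.2 = false := by simpa using h2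
    have e1 := PySem.Dict.getD_of_not_contains sub PySem.Set.empty h1'
    have e2 := PySem.Dict.getD_of_not_contains sub PySem.Set.empty h2'
    simp only [h1', h2', Bool.false_eq_true, if_false, e1, e2]
    simp [PySem.Set.empty]

theorem out_fold_mem (sub : PySem.Dict Int (PySem.Set Int)) (triple : List (Int × Int × Int))
    (o : PySem.Set (Int × Int × Int)) (z : Int × Int × Int) :
    z ∈ triple.foldl (outStep sub) o ↔ z ∈ o ∨ ∃ x ∈ triple,
      (∃ p ∈ sub.getD x.1 PySem.Set.empty, z = (p, x.2.1, x.2.2))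
      ∨ (∃ p ∈ sub.getD x.2.2 PySem.Set.empty, z = (x.1, x.2.1, p)) := by
  induction triple generalizing o with
  | nil => simp
  | cons x tr ih =>
    simp only [List.foldl_cons, List.mem_cons]
    rw [ih, outStep_mem]
    constructor
    · rintro ((h | h | h) | ⟨q, hq, hh⟩)
      · exact Or.inl h
      · exact Or.inr ⟨x, Or.inl rfl, Or.inl h⟩
      · exact Or.inr ⟨x, Or.inl rfl, Or.inr h⟩
      · exact Or.inr ⟨q, Or.inr hq, hh⟩
    · rintro (h | ⟨q, (rfl | hq), hh⟩)
      · exact Or.inl (Or.inl h)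
      · exact Or.inl (Or.inr hh)
      · exact Or.inr ⟨q, hq, hh⟩

theorem memB_iff (A : List Int) (B : List Int) (triple : List (Int × Int × Int)) (z : Int × Int × Int) :
    z ∈ triple.foldl (outStep ((A.zip B).foldl subStep PySem.Dict.empty)) PySem.Set.empty
      ↔ EmitSpec A B triple z := by
  rw [out_fold_mem]
  have hsub : ∀ e p : Int, p ∈ ((A.zip B).foldl subStep PySem.Dict.empty).getD e PySem.Set.empty
      ↔ ∃ ab ∈ A.zip B, (ab.1 = e ∧ ab.2 = p) ∨ (ab.2 = e ∧ ab.1 = p) := by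
    intro e p
    rw [sub_getD_mem]
    simp [PySem.Dict.getD_empty, PySem.Set.empty]
  simp only [hsub]
  unfold EmitSpec
  constructor
  · rintro (h | ⟨x, hx, (⟨p, ⟨ab, hab, (⟨he, hp⟩ | ⟨he, hp⟩)⟩, rfl⟩ | ⟨p, ⟨ab, hab, (⟨he, hp⟩ | ⟨he, hp⟩)⟩, rfl⟩)⟩)
    · simp [PySem.Set.empty] at h
    · exact ⟨ab, hab, x, hx, Or.inl ⟨he.symm, by rw [hp]⟩⟩
    · exact ⟨ab, hab, x, hx, Or.inr (Or.inr (Or.inl ⟨he.symm, by rw [hp]⟩))⟩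
    · exact ⟨ab, hab, x, hx, Or.inr (Or.inl ⟨he.symm, by rw [hp]⟩)⟩
    · exact ⟨ab, hab, x, hx, Or.inr (Or.inr (Or.inr ⟨he.symm, by rw [hp]⟩))⟩
  · rintro ⟨ab, hab, x, hx, (⟨h1, rfl⟩ | ⟨h1, rfl⟩ | ⟨h1, rfl⟩ | ⟨h1, rfl⟩)⟩
    · exact Or.inr ⟨x, hx, Or.inl ⟨ab.2, ⟨ab, hab, Or.inl ⟨h1.symm, rfl⟩⟩, rfl⟩⟩
    · exact Or.inr ⟨x, hx, Or.inr ⟨ab.2, ⟨ab, hab, Or.inl ⟨h1.symm, rfl⟩⟩, rfl⟩⟩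
    · exact Or.inr ⟨x, hx, Or.inl ⟨ab.1, ⟨ab, hab, Or.inr ⟨h1.symm, rfl⟩⟩, rfl⟩⟩
    · exact Or.inr ⟨x, hx, Or.inr ⟨ab.1, ⟨ab, hab, Or.inr ⟨h1.symm, rfl⟩⟩, rfl⟩⟩

theorem nodup_add_fold {β : Type} (f : β → Int × Int × Int) (l : List β)
    (s : PySem.Set (Int × Int × Int)) (h : s.Nodup) :
    (l.foldl (fun o p => o.add (f p)) s).Nodup := by
  induction l generalizing s with
  | nil => exact h
  | cons b l ih => exact ih _ (PySem.Set.nodup_add s (f b) h)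

theorem nodup_out (A : List Int) (B : List Int) (triple : List (Int × Int × Int)) :
    (triple.foldl (outStep ((A.zip B).foldl subStep PySem.Dict.empty)) PySem.Set.empty).Nodup := by
  have main : ∀ (tr : List (Int × Int × Int)) (o : PySem.Set (Int × Int × Int)), o.Nodup →
      (tr.foldl (outStep ((A.zip B).foldl subStep PySem.Dict.empty)) o).Nodup := by
    intro tr
    induction tr with
    | nil => exact fun o h => h
    | cons x tr ih =>
      intro o h
      refine ih _ ?_
      unfold outStep
      split_ifs <;> first
        | exact nodup_add_fold _ _ _ (nodup_add_fold _ _ _ h)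
        | exact nodup_add_fold _ _ _ h
        | exact h
  exact main triple PySem.Set.empty (by simp [PySem.Set.empty])

-- ===== VERDICT (by name: the statement is the Claim_ definition above) =====
theorem boot_update_triple_spec : Claim_equal_boot_update_triple := by
  intro A B triple _ hpre
  unfold Spec_boot_update_triple boot_update_triple boot_update_triple_alt
  rw [PySem.List.foldl_prod_mk (f := hrtStep) (g := thrStep)]
  apply sortTriples_eq_of_perm
  rw [List.perm_ext_iff_of_nodup (PySem.Set.nodup_ofList _) (nodup_out A B triple)]
  intro z
  rw [PySem.Set.mem_ofList, memB_iff A B triple z]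
  exact memA_iff A B triple hpre z
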